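-- pv_equiv track=rewrite | github.com/feliposz/project-euler-solutions | python/euler54.py | getRepeatedCards
-- ===== SOURCE A (Python) =====
-- def getRepeatedCards(hand):
--     """Returns only the cards with repeated values in the hand."""
--     # Count repeated cards
--     count = {}
--     for card in hand:
--         v = cardValue(card)
--         count[v] = count.get(v, 0) + 1
--     repeatedCards = []
--     for card in hand:
--         v = cardValue(card)
--         if count[v] > 1:
--             repeatedCards.append(card)
--     return repeatedCards
--
-- def cardValue(card):
--     """Returns the value of a given card."""
--     if card[0] >= '2' and card[0] <= '9':
--         return int(card[0])
--     elif card[0] == 'T':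
--         return 10
--     elif card[0] == 'J':
--         return 11
--     elif card[0] == 'Q':
--         return 12
--     elif card[0] == 'K':
--         return 13
--     elif card[0] == 'A':
--         return 14
-- ===== SOURCE B (Python) =====
-- def getRepeatedCards(hand):
--     """Returns only the cards with repeated values in the hand."""
--     repeated = []
--     seen = set()
--     for i, card in enumerate(hand):
--         v = cardValue(card)
--         if v in seen or any(cardValue(c) == v for c in hand[i + 1:]):
--             repeated.append(card)
--         seen.add(v)
--     return repeated
--
-- def cardValue(card):
--     """Returns the value of a given card."""
--     if card[0] >= '2' and card[0] <= '9':
--         return int(card[0])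
--     elif card[0] == 'T':
--         return 10
--     elif card[0] == 'J':
--         return 11
--     elif card[0] == 'Q':
--         return 12
--     elif card[0] == 'K':
--         return 13
--     elif card[0] == 'A':
--         return 14
-- ===== Notes on version B (the rewrite author's own statement) =====
-- stated objective: alternative
-- what changed: Replaces A's build-a-count-dictionary-then-filter (two passes, counting) with a single pass that keeps no counts at all: a card is emitted when its value is in the set of values already seen or a short-circuiting lookahead finds the same value later in the hand.
import Mathlib
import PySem

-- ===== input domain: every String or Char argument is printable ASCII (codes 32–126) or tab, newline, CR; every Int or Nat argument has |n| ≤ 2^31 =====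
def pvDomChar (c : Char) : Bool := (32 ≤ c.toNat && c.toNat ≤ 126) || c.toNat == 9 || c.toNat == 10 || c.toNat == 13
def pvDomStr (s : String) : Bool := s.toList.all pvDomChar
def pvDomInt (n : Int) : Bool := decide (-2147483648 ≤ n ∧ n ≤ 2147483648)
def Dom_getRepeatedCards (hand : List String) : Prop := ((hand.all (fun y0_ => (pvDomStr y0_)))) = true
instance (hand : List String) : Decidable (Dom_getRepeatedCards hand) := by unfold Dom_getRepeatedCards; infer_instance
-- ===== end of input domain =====

-- B replaces A's count-dictionary-then-filter with a single pass keeping a seen-set of past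
-- values plus a short-circuit lookahead probe (objective: alternative; no counting, not faster).


-- ===== PORT A =====
-- cardValue: 'none' is the Python value None (falls off the if-chain); for a digit char c,
-- int(c) is exactly c.toNat - 48 on '2'..'9'. On "" Python raises IndexError (excluded by Pre_).
def cardValue (card : String) : Option Int :=
  match PySem.Str.pyGet? card 0 with
  | none => none
  | some c =>
    if '2' ≤ c ∧ c ≤ '9' then some ((c.toNat : Int) - 48)
    else if c = 'T' then some 10
    else if c = 'J' then some 11
    else if c = 'Q' then some 12
    else if c = 'K' then some 13
    else if c = 'A' then some 14
    else none

def getRepeatedCards (hand : List String) : List String :=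
  let count : PySem.Dict (Option Int) Int :=
    hand.foldl (fun d card => d.insert (cardValue card) (d.getD (cardValue card) 0 + 1))
      PySem.Dict.empty
  hand.foldl (fun acc card => if count.getD (cardValue card) 0 > 1 then acc ++ [card] else acc) []

-- ===== PORT B =====
-- single loop over enumerate(hand); seen is a Python set; hand[i+1:] is PySem.List.slice
def getRepeatedCards_alt (hand : List String) : List String :=
  ((PySem.List.enumerate hand 0).foldl
    (fun (st : List String × PySem.Set (Option Int)) (p : Int × String) =>
      let v := cardValue p.2
      ((if st.2.contains v
           || (PySem.List.slice hand (some (p.1 + 1)) none).any (fun c => cardValue c == v)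
        then st.1 ++ [p.2] else st.1),
       st.2.add v))
    ([], PySem.Set.empty)).1

-- ===== PRECONDITION & SPEC =====
-- Pre_ excludes hands containing the empty string, on which A raises IndexError (card[0]).
def Pre_getRepeatedCards (hand : List String) : Prop := ∀ s ∈ hand, s ≠ ""
instance (hand : List String) : Decidable (Pre_getRepeatedCards hand) := by unfold Pre_getRepeatedCards; infer_instance
def pvWitness_getRepeatedCards : List String := ["2H", "3D", "2C", "KH"]

def Spec_getRepeatedCards (hand : List String) (out : List String) : Prop := out = getRepeatedCards_alt hand
instance (hand : List String) (out : List String) : Decidable (Spec_getRepeatedCards hand out) := by unfold Spec_getRepeatedCards; infer_instance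

-- ===== CLAIM (what is proved, stated in full; the proofs are below) =====
def Claim_equal_getRepeatedCards : Prop := ∀ (hand : List String), Dom_getRepeatedCards hand → Pre_getRepeatedCards hand → Spec_getRepeatedCards hand (getRepeatedCards hand)

-- ===== LEMMAS AND PROOFS =====
-- A's counting loop builds exactly Counter(map cardValue hand)
theorem count_eq_counter (hand : List String) :
    hand.foldl (fun d card => d.insert (cardValue card) (d.getD (cardValue card) 0 + 1))
      PySem.Dict.empty = PySem.Dict.counter (hand.map cardValue) := by
  rw [← PySem.Dict.foldl_insert_getD_add_one_eq_counter, List.foldl_map]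

-- A returns hand filtered to the cards whose value occurs more than once
theorem getRepeatedCards_eq_filter (hand : List String) :
    getRepeatedCards hand
      = hand.filter (fun card => 1 < (hand.map cardValue).count (cardValue card)) := by
  unfold getRepeatedCards
  rw [count_eq_counter]
  show List.foldl (fun acc card =>
      if (PySem.Dict.counter (hand.map cardValue)).getD (cardValue card) 0 > 1
      then acc ++ [card] else acc) [] hand = _
  rw [PySem.List.foldl_append_ite_eq_filter, List.nil_append]
  apply List.filter_congr
  intro card _
  rw [PySem.Dict.getD_counter]
  simp

-- any-probe over cards equals membership of the value among their values
theorem any_beq_eq_mem (l : List String) (v : Option Int) :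
    (l.any fun c => cardValue c == v) = decide (v ∈ l.map cardValue) := by
  induction l with
  | nil => simp
  | cons a t ih =>
    rw [List.any_cons, ih, List.map_cons]
    rw [Bool.eq_iff_iff]
    simp only [Bool.or_eq_true, beq_iff_eq, decide_eq_true_eq, List.mem_cons]
    constructor
    · rintro (h | h); exact Or.inl h.symm; exact Or.inr h
    · rintro (h | h); exact Or.inl h.symm; exact Or.inr h

-- invariant of B's single loop: processing the suffix 'rest' of hand (pre ++ rest = hand)
-- with 'seen' holding exactly the values of 'pre' appends exactly the repeated cards of 'rest'
theorem alt_loop (hand pre rest acc : List String) (seen : PySem.Set (Option Int))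
    (hsplit : hand = pre ++ rest)
    (hseen : ∀ x, x ∈ seen ↔ x ∈ pre.map cardValue) :
    ((PySem.List.enumerate rest (pre.length : Int)).foldl
      (fun (st : List String × PySem.Set (Option Int)) (p : Int × String) =>
        let v := cardValue p.2
        ((if st.2.contains v
             || (PySem.List.slice hand (some (p.1 + 1)) none).any (fun c => cardValue c == v)
          then st.1 ++ [p.2] else st.1),
         st.2.add v))
      (acc, seen)).1
    = acc ++ rest.filter (fun c =>
        decide (cardValue c ∈ pre.map cardValue)
        || decide (1 < (rest.map cardValue).count (cardValue c))) := by
  induction rest generalizing pre acc seen with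
  | nil => simp [PySem.List.enumerate]
  | cons card tail ih =>
    rw [PySem.List.enumerate_cons, List.foldl_cons]
    have hslice : PySem.List.slice hand (some ((pre.length : Int) + 1)) none = tail := by
      have h1 : ((pre.length : Int) + 1) = ((pre.length + 1 : Nat) : Int) := by push_cast; ring
      rw [h1, PySem.List.slice_from_natCast, hsplit]
      simp [List.drop_append]
    have hcontains : seen.contains (cardValue card)
        = decide (cardValue card ∈ pre.map cardValue) := by
      rw [Bool.eq_iff_iff, PySem.Set.contains_iff, decide_eq_true_eq]
      exact hseen _
    dsimp only
    rw [hslice, hcontains, any_beq_eq_mem]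
    have hlen : (pre.length : Int) + 1 = (((pre ++ [card]).length : Nat) : Int) := by
      simp
    rw [hlen,
      ih (pre ++ [card])
        (if decide (cardValue card ∈ pre.map cardValue)
            || decide (cardValue card ∈ tail.map cardValue)
         then acc ++ [card] else acc)
        (seen.add (cardValue card))
        (by rw [hsplit, List.append_assoc]; rfl)
        (by intro x
            rw [PySem.Set.mem_add, List.map_append]
            simp [hseen x, or_comm, eq_comm])]
    rw [List.filter_cons]
    have hhead : (decide (cardValue card ∈ pre.map cardValue)
        || decide (1 < ((card :: tail).map cardValue).count (cardValue card)))
        = (decide (cardValue card ∈ pre.map cardValue)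
           || decide (cardValue card ∈ tail.map cardValue)) := by
      rw [List.map_cons, List.count_cons_self]
      congr 1
      rw [decide_eq_decide]
      rw [← List.count_pos_iff (a := cardValue card) (l := tail.map cardValue)]
      omega
    have htail : List.filter (fun c =>
          decide (cardValue c ∈ (pre ++ [card]).map cardValue)
          || decide (1 < (tail.map cardValue).count (cardValue c))) tail
        = List.filter (fun c =>
          decide (cardValue c ∈ pre.map cardValue)
          || decide (1 < ((card :: tail).map cardValue).count (cardValue c))) tail := by
      apply List.filter_congr
      intro c hc
      by_cases hwv : cardValue c = cardValue card
      · rw [Bool.eq_iff_iff]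
        simp only [Bool.or_eq_true, decide_eq_true_eq, List.map_append, List.map_cons,
          List.map_nil, List.mem_append, List.mem_cons, List.not_mem_nil, or_false,
          List.count_cons, beq_iff_eq]
        have h2 : 0 < (tail.map cardValue).count (cardValue c) :=
          List.count_pos_iff.mpr (List.mem_map_of_mem hc)
        rw [if_pos hwv.symm]
        constructor
        · intro _; right; omega
        · intro _; left; right; exact hwv
      · rw [Bool.eq_iff_iff]
        simp only [Bool.or_eq_true, decide_eq_true_eq, List.map_append, List.map_cons,
          List.map_nil, List.mem_append, List.mem_cons, List.not_mem_nil, or_false,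
          List.count_cons, beq_iff_eq]
        rw [if_neg (fun h => hwv h.symm)]
        simp [hwv]
    rw [htail, hhead]
    by_cases h : (decide (cardValue card ∈ pre.map cardValue)
        || decide (cardValue card ∈ tail.map cardValue)) = true
    · rw [if_pos h, if_pos h, List.append_assoc]
      rfl
    · rw [if_neg h, if_neg h]

theorem getRepeatedCards_eq_alt (hand : List String) :
    getRepeatedCards hand = getRepeatedCards_alt hand := by
  rw [getRepeatedCards_eq_filter]
  unfold getRepeatedCards_alt
  have h := alt_loop hand [] hand [] PySem.Set.empty (by simp)
    (by intro x; simp [PySem.Set.empty])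
  simp only [List.length_nil, Nat.cast_zero, List.map_nil, List.not_mem_nil,
    decide_false, Bool.false_or, List.nil_append] at h
  rw [h]

-- ===== VERDICT (by name: the statement is the Claim_ definition above) =====
theorem getRepeatedCards_spec : Claim_equal_getRepeatedCards := by
  intro hand _ _
  exact getRepeatedCards_eq_alt hand
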